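-- pv_equiv track=rewrite | github.com/Pickett05/Horton_analysis | Python_files/Community_detection_codes.py | reorder_level
-- ===== SOURCE A (Python) =====
-- def common_member(a, b):
--     '''
--     Input parameters:
--         a = list
--         b = list
--     Output:
--         Boolean value: whether a and b have anything in common
--     '''
--     a_set = set(a)
--     b_set = set(b)
--     # check length
--     if len(a_set.intersection(b_set)) > 0:
--         return(True)
--     else:
--         return(False)
--
-- def reorder_level(C_list_prev, C_list_current):
--     '''
--     Input parameters:
--         C_list_prev = list of lists of communities at prev level
--         C_list_current = list of lists of communities at current level
--     Output:
--         Community_ordered_dict: Dictionary where keys are previous communities and values are list of lists of current communities branched out from the previous one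
--     '''
--     Community_ordered_dict = {}
--     ind = 0
--     for j in C_list_prev:
--         Community_ordered_dict[ind] = []
--         for i in C_list_current:
--
--             if common_member(i,j):
--                 Community_ordered_dict[ind].append(i)
--         ind = ind+1
--     return Community_ordered_dict
-- ===== SOURCE B (Python) =====
-- def reorder_level(C_list_prev, C_list_current):
--     # Invert element -> set of prev-community indices, then scan current once.
--     inv = {}
--     for p, comm in enumerate(C_list_prev):
--         for x in comm:
--             inv.setdefault(x, set()).add(p)
--     buckets = [[] for _ in C_list_prev]
--     for c in C_list_current:
--         hit = set()
--         for x in c: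
--             hit |= inv.get(x, set())
--         for p in hit:
--             buckets[p].append(c)
--     return {p: b for p, b in enumerate(buckets)}
-- ===== Notes on version B (the rewrite author's own statement) =====
-- stated objective: faster
-- what changed: Replaces A's nested prev-x-current scan with per-pair set intersections by a single inverted element-to-prev-indices map built once, then one scan over the current communities appending each to all overlapping prev buckets.
import Mathlib
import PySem

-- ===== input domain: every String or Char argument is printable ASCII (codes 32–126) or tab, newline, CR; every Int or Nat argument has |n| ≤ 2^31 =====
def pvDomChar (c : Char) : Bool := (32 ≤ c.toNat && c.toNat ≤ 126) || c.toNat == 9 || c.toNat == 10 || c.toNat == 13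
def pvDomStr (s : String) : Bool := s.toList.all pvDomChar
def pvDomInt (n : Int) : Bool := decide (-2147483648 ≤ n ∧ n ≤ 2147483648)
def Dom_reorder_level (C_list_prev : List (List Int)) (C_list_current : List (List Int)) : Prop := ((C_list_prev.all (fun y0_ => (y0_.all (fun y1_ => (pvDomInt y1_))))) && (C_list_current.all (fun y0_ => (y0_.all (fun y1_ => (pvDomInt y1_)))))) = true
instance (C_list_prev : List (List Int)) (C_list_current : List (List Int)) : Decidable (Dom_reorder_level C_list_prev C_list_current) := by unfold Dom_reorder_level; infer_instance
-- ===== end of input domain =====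

-- B replaces A's nested prev×current scan by an inverted element→prev-index map and one scan
-- over the current communities (objective: faster, asymptotically fewer membership passes).

-- ===== PORT A =====
-- common_member(a, b): len(set(a) & set(b)) > 0
def pvCommonMember (a b : List Int) : Bool :=
  let a_set := PySem.Set.ofList a
  let b_set := PySem.Set.ofList b
  if 0 < (PySem.Set.inter a_set b_set).length then true else false

def reorder_level (C_list_prev : List (List Int)) (C_list_current : List (List Int)) : List (Int × List (List Int)) :=
  -- Community_ordered_dict = {}; ind = 0; nested for-loops appending matching current communities
  let st := C_list_prev.foldl
    (fun (st : PySem.Dict Int (List (List Int)) × Int) j =>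
      let d := st.1.insert st.2 ([] : List (List Int))
      let d := C_list_current.foldl
        (fun d i => if pvCommonMember i j then d.modify st.2 [] (fun v => v ++ [i]) else d) d
      (d, st.2 + 1))
    (PySem.Dict.empty, 0)
  st.1.items

-- ===== PORT B =====
-- inv: element -> set of indices of prev communities containing it
def pvInv (C_list_prev : List (List Int)) : PySem.Dict Int (PySem.Set Int) :=
  (PySem.List.enumerate C_list_prev).foldl
    (fun inv pc => pc.2.foldl
      (fun inv x => inv.modify x PySem.Set.empty (fun s => PySem.Set.add s pc.1)) inv)
    PySem.Dict.empty

-- hit = union of inv[x] over x in c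
def pvHit (inv : PySem.Dict Int (PySem.Set Int)) (c : List Int) : PySem.Set Int :=
  c.foldl (fun h x => PySem.Set.update h (inv.getD x PySem.Set.empty)) PySem.Set.empty

def reorder_level_alt (C_list_prev : List (List Int)) (C_list_current : List (List Int)) : List (Int × List (List Int)) :=
  let inv := pvInv C_list_prev
  let buckets0 := C_list_prev.map (fun _ => ([] : List (List Int)))
  -- for c in current: append c to buckets[p] for each p in hit (indices are ≥ 0, so .toNat is exact)
  let buckets := C_list_current.foldl
    (fun bs c => (pvHit inv c).foldl (fun bs p => bs.modify p.toNat (fun b => b ++ [c])) bs)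
    buckets0
  PySem.List.enumerate buckets

-- ===== PRECONDITION & SPEC =====
def Spec_reorder_level (C_list_prev : List (List Int)) (C_list_current : List (List Int)) (out : List (Int × List (List Int))) : Prop := out = reorder_level_alt C_list_prev C_list_current
instance (C_list_prev : List (List Int)) (C_list_current : List (List Int)) (out : List (Int × List (List Int))) : Decidable (Spec_reorder_level C_list_prev C_list_current out) := by unfold Spec_reorder_level; infer_instance

-- ===== CLAIM (what is proved, stated in full; the proofs are below) =====
def Claim_equal_reorder_level : Prop := ∀ (C_list_prev : List (List Int)) (C_list_current : List (List Int)), Dom_reorder_level C_list_prev C_list_current → Spec_reorder_level C_list_prev C_list_current (reorder_level C_list_prev C_list_current)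

-- ===== LEMMAS AND PROOFS =====

-- target form both ports are reduced to
def pvTarget (C_list_prev : List (List Int)) (C_list_current : List (List Int)) : List (Int × List (List Int)) :=
  (PySem.List.enumerate C_list_prev).map (fun pj => (pj.1, C_list_current.filter (fun i => pvCommonMember i pj.2)))

theorem common_iff (a b : List Int) : pvCommonMember a b = true ↔ ∃ x ∈ a, x ∈ b := by
  simp [pvCommonMember, List.length_pos_iff_exists_mem, PySem.Set.mem_inter, PySem.Set.mem_ofList]

-- ---- A side ----

theorem dict_insert_getD_self {ν : Type} (d : PySem.Dict Int ν) (k : Int) (d0 : ν)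
    (hc : d.contains k = true) (hn : d.keys.Nodup) : d.insert k (d.getD k d0) = d := by
  apply PySem.Dict.ext
  rw [PySem.Dict.items_insert_of_contains d _ hc]
  conv_rhs => rw [← List.map_id d.items]
  apply List.map_congr_left
  intro p hp
  obtain ⟨p1, p2⟩ := p
  by_cases hpk : p1 = k
  · subst hpk
    have hg : d.getD p1 d0 = p2 := PySem.Dict.getD_of_mem_items d hp hn d0
    simp [hg]
  · simp [hpk]

theorem lemA_inner (l : List (List Int)) (e : PySem.Dict Int (List (List Int))) (k : Int)
    (hc : e.contains k = true) (hn : e.keys.Nodup) :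
    l.foldl (fun d i => d.modify k [] (fun v => v ++ [i])) e = e.insert k (e.getD k [] ++ l) := by
  induction l generalizing e with
  | nil => simpa using (dict_insert_getD_self e k [] hc hn).symm
  | cons i l ih =>
    have hstep : e.modify k [] (fun v => v ++ [i]) = e.insert k (e.getD k [] ++ [i]) := rfl
    rw [List.foldl_cons, hstep,
      ih (e.insert k (e.getD k [] ++ [i])) (PySem.Dict.contains_insert_self ..)
        (PySem.Dict.nodup_keys_insert _ _ _ hn),
      PySem.Dict.getD_insert_self, PySem.Dict.insert_insert_self]
    simp

theorem lemA_outer (l : List (List Int)) (cur : List (List Int))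
    (d : PySem.Dict Int (List (List Int))) (ind : Int)
    (hn : d.keys.Nodup) (hb : ∀ k ∈ d.keys, k < ind) :
    (l.foldl
      (fun (st : PySem.Dict Int (List (List Int)) × Int) j =>
        let d := st.1.insert st.2 ([] : List (List Int))
        let d := cur.foldl
          (fun d i => if pvCommonMember i j then d.modify st.2 [] (fun v => v ++ [i]) else d) d
        (d, st.2 + 1)) (d, ind)).1.items
    = d.items ++ (PySem.List.enumerate l ind).map
        (fun pj => (pj.1, cur.filter (fun i => pvCommonMember i pj.2))) := by
  induction l generalizing d ind with
  | nil => simp [PySem.List.enumerate_nil]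
  | cons j l ih =>
    have hfresh : d.contains ind = false := by
      rw [← Bool.not_eq_true, PySem.Dict.contains_iff_mem_keys]
      intro hmem
      exact absurd (hb ind hmem) (lt_irrefl ind)
    have hinner :
        cur.foldl (fun d' i => if pvCommonMember i j then d'.modify ind [] (fun v => v ++ [i]) else d')
            (d.insert ind ([] : List (List Int)))
          = d.insert ind (cur.filter (fun i => pvCommonMember i j)) := by
      rw [← List.foldl_filter,
        lemA_inner _ _ _ (PySem.Dict.contains_insert_self ..) (PySem.Dict.nodup_keys_insert _ _ _ hn),
        PySem.Dict.getD_insert_self, PySem.Dict.insert_insert_self]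
      simp
    rw [List.foldl_cons]
    show (l.foldl _ (cur.foldl (fun d' i => if pvCommonMember i j then d'.modify ind [] (fun v => v ++ [i]) else d') (d.insert ind ([] : List (List Int))), ind + 1)).1.items = _
    rw [hinner,
      ih (d.insert ind (cur.filter (fun i => pvCommonMember i j))) (ind + 1)
        (PySem.Dict.nodup_keys_insert _ _ _ hn)
        (by intro k hk
            rcases (PySem.Dict.mem_keys_insert ..).mp hk with h | h
            · omega
            · have := hb k h; omega),
      PySem.Dict.items_insert_of_not_contains d _ hfresh,
      PySem.List.enumerate_cons]
    simp

theorem A_final (prev cur : List (List Int)) :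
    reorder_level prev cur = pvTarget prev cur := by
  show (prev.foldl _ (PySem.Dict.empty, 0)).1.items = _
  rw [lemA_outer prev cur PySem.Dict.empty 0 (by simp [PySem.Dict.keys_empty])
      (by simp [PySem.Dict.keys_empty])]
  simp [pvTarget]
  rfl

-- ---- B side ----

theorem lemInv_inner (xs : List Int) (q : Int) (d : PySem.Dict Int (PySem.Set Int)) (x p : Int) :
    p ∈ (xs.foldl (fun d x => d.modify x PySem.Set.empty (fun s => PySem.Set.add s q)) d).getD x PySem.Set.empty
    ↔ p ∈ d.getD x PySem.Set.empty ∨ (x ∈ xs ∧ p = q) := by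
  induction xs generalizing d with
  | nil => simp
  | cons y xs ih =>
    rw [List.foldl_cons, ih]
    rw [PySem.Dict.getD_modify]
    by_cases hxy : x = y
    · subst hxy
      simp [PySem.Set.mem_add]
      tauto
    · simp [hxy]

theorem lemInv_outer (L : List (Int × List Int)) (d : PySem.Dict Int (PySem.Set Int)) (x p : Int) :
    p ∈ (L.foldl (fun inv pc => pc.2.foldl
          (fun inv x => inv.modify x PySem.Set.empty (fun s => PySem.Set.add s pc.1)) inv) d).getD x PySem.Set.empty
    ↔ p ∈ d.getD x PySem.Set.empty ∨ ∃ pc ∈ L, x ∈ pc.2 ∧ p = pc.1 := by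
  induction L generalizing d with
  | nil => simp
  | cons pc L ih =>
    rw [List.foldl_cons, ih, lemInv_inner]
    simp only [List.mem_cons]
    constructor
    · rintro ((h | h) | ⟨pc', hpc', h⟩)
      · exact Or.inl h
      · exact Or.inr ⟨pc, Or.inl rfl, h⟩
      · exact Or.inr ⟨pc', Or.inr hpc', h⟩
    · rintro (h | ⟨pc', (rfl | hpc'), h⟩)
      · exact Or.inl (Or.inl h)
      · exact Or.inl (Or.inr h)
      · exact Or.inr ⟨pc', hpc', h⟩

theorem lemInv_mem (prev : List (List Int)) (x p : Int) :
    p ∈ (pvInv prev).getD x PySem.Set.empty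
    ↔ ∃ (k : Nat), ∃ (_ : k < prev.length), x ∈ prev[k] ∧ p = (k : Int) := by
  show p ∈ ((PySem.List.enumerate prev).foldl _ PySem.Dict.empty).getD x PySem.Set.empty ↔ _
  rw [lemInv_outer]
  simp only [PySem.Dict.getD_empty]
  constructor
  · rintro (h | ⟨pc, hpc, hx, rfl⟩)
    · simp [PySem.Set.empty] at h
    · rcases (PySem.List.mem_enumerate_iff ..).mp hpc with ⟨k, hk, rfl⟩
      exact ⟨k, hk, hx, by simp⟩
  · rintro ⟨k, hk, hx, rfl⟩
    refine Or.inr ⟨((k : Int), prev[k]), ?_, hx, rfl⟩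
    exact (PySem.List.mem_enumerate_iff ..).mpr ⟨k, hk, by simp⟩

theorem lemHit_fold (c : List Int) (inv : PySem.Dict Int (PySem.Set Int)) (h0 : PySem.Set Int) (p : Int) :
    p ∈ c.foldl (fun h x => PySem.Set.update h (inv.getD x PySem.Set.empty)) h0
    ↔ p ∈ h0 ∨ ∃ x ∈ c, p ∈ inv.getD x PySem.Set.empty := by
  induction c generalizing h0 with
  | nil => simp
  | cons y c ih =>
    rw [List.foldl_cons, ih, PySem.Set.mem_update]
    simp only [List.mem_cons]
    constructor
    · rintro ((h | h) | ⟨x, hx, h⟩)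
      · exact Or.inl h
      · exact Or.inr ⟨y, Or.inl rfl, h⟩
      · exact Or.inr ⟨x, Or.inr hx, h⟩
    · rintro (h | ⟨x, (rfl | hx), h⟩)
      · exact Or.inl (Or.inl h)
      · exact Or.inl (Or.inr h)
      · exact Or.inr ⟨x, hx, h⟩

theorem lemHit_mem (prev : List (List Int)) (c : List Int) (p : Int) :
    p ∈ pvHit (pvInv prev) c
    ↔ ∃ x ∈ c, ∃ (k : Nat), ∃ (_ : k < prev.length), x ∈ prev[k] ∧ p = (k : Int) := by
  show p ∈ c.foldl _ PySem.Set.empty ↔ _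
  rw [lemHit_fold]
  simp only [lemInv_mem]
  constructor
  · rintro (h | h)
    · simp [PySem.Set.empty] at h
    · exact h
  · exact Or.inr

theorem lemHit_nodup (inv : PySem.Dict Int (PySem.Set Int)) (c : List Int) :
    (pvHit inv c).Nodup := by
  show (c.foldl _ PySem.Set.empty).Nodup
  have : ∀ (c : List Int) (h0 : PySem.Set Int), h0.Nodup →
      (c.foldl (fun h x => PySem.Set.update h (inv.getD x PySem.Set.empty)) h0).Nodup := by
    intro c
    induction c with
    | nil => intro h0 h; exact h
    | cons y c ih => intro h0 h; exact ih _ (PySem.Set.nodup_update _ _ h)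
  exact this c PySem.Set.empty (by simp [PySem.Set.empty])

theorem hit_nonneg (prev : List (List Int)) (c : List Int) (p : Int)
    (h : p ∈ pvHit (pvInv prev) c) : 0 ≤ p := by
  rcases (lemHit_mem prev c p).mp h with ⟨x, _, k, _, _, rfl⟩
  positivity

theorem hit_iff_common (prev : List (List Int)) (c : List Int) (q : Nat) (hq : q < prev.length) :
    ((q : Int) ∈ pvHit (pvInv prev) c) ↔ pvCommonMember c prev[q] = true := by
  rw [common_iff, lemHit_mem]
  constructor
  · rintro ⟨x, hx, k, hk, hxk, hqk⟩
    have : q = k := by exact_mod_cast hqk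
    subst this
    exact ⟨x, hx, hxk⟩
  · rintro ⟨x, hx, hxq⟩
    exact ⟨x, hx, q, hq, hxq, rfl⟩

theorem lemBuck_get? (hs : List Int) (bs : List (List (List Int))) (c : List Int) (q : Nat)
    (hnd : hs.Nodup) (hnn : ∀ p ∈ hs, 0 ≤ p) :
    (hs.foldl (fun bs p => bs.modify p.toNat (fun b => b ++ [c])) bs)[q]?
    = if (q : Int) ∈ hs then bs[q]?.map (fun b => b ++ [c]) else bs[q]? := by
  induction hs generalizing bs with
  | nil => simp
  | cons p hs ih =>
    rw [List.foldl_cons, ih _ hnd.of_cons (fun x hx => hnn x (List.mem_cons_of_mem _ hx))]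
    have hp0 : 0 ≤ p := hnn p (List.mem_cons_self ..)
    by_cases hqp : (q : Int) = p
    · have hqn : p.toNat = q := by omega
      have hnot : p ∉ hs := (List.nodup_cons.mp hnd).1
      simp [hqp, hnot, hqn, List.getElem?_modify_eq]
    · have hqn : p.toNat ≠ q := by omega
      rw [List.getElem?_modify_ne _ _ hqn]
      simp [List.mem_cons, hqp]

theorem lemBuckCur (l : List (List Int)) (prev : List (List Int)) (bs : List (List (List Int))) (q : Nat) :
    (l.foldl (fun bs c => (pvHit (pvInv prev) c).foldl
        (fun bs p => bs.modify p.toNat (fun b => b ++ [c])) bs) bs)[q]?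
    = bs[q]?.map (fun b => b ++ l.filter (fun c => decide ((q : Int) ∈ pvHit (pvInv prev) c))) := by
  induction l generalizing bs with
  | nil =>
    cases h : bs[q]? <;> simp [h]
  | cons c l ih =>
    rw [List.foldl_cons, ih,
      lemBuck_get? _ _ _ _ (lemHit_nodup ..) (fun p hp => hit_nonneg prev c p hp)]
    by_cases hm : (q : Int) ∈ pvHit (pvInv prev) c
    · simp only [List.filter_cons, hm, decide_true]
      cases bs[q]? <;> simp
    · simp only [List.filter_cons, hm, decide_false]
      cases bs[q]? <;> simp

theorem B_final (prev cur : List (List Int)) :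
    reorder_level_alt prev cur = pvTarget prev cur := by
  show PySem.List.enumerate (cur.foldl _ (prev.map _)) = _
  apply List.ext_getElem?
  intro q
  rw [PySem.List.getElem?_enumerate, lemBuckCur]
  unfold pvTarget
  rw [List.getElem?_map, List.getElem?_map, PySem.List.getElem?_enumerate]
  cases hpq : prev[q]? with
  | none => simp
  | some j =>
    obtain ⟨hq, hj⟩ := List.getElem?_eq_some_iff.mp hpq
    simp only [Option.map_some]
    have hfil : cur.filter (fun c => decide ((q : Int) ∈ pvHit (pvInv prev) c))
        = cur.filter (fun i => pvCommonMember i j) := by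
      apply List.filter_congr
      intro c _
      have hic := hit_iff_common prev c q hq
      rw [hj] at hic
      simp [hic]
    simp [hfil]

-- ===== VERDICT (by name: the statement is the Claim_ definition above) =====
theorem reorder_level_spec : Claim_equal_reorder_level := by
  intro prev cur _
  unfold Spec_reorder_level
  rw [A_final, B_final]
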